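-- pv_equiv track=rewrite | github.com/TommyTram/AdventOfCode | day5/python/day5.py | find_nr
-- ===== SOURCE A (Python) =====
-- def find_nr(row_code, total_len):
--     candidates = list(range(total_len))
--     # BFBBBFF
--     for code in row_code:
--         split = int(len(candidates)/2)
--         if code == 'F' or code == 'L':
--             candidates = candidates[:split]
--         elif code == 'B' or code ==  'R':
--             candidates = candidates[split:]
--
--     return candidates[0]
-- ===== SOURCE B (Python) =====
-- def find_nr(row_code, total_len):
--     # Stage 1: record the block length in effect before each character's step.
--     lengths = []
--     l = total_len
--     for c in row_code:
--         lengths.append(l)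
--         if c == 'F' or c == 'L':
--             l = l // 2
--         elif c == 'B' or c == 'R':
--             l = l - l // 2
--     # Stage 2: the selected index is the total size of the lower halves skipped
--     # at the B/R steps; no candidate list or interval is ever represented.
--     total = 0
--     for c, m in zip(row_code, lengths):
--         if c == 'B' or c == 'R':
--             total += m // 2
--     return total
-- ===== Notes on version B (the rewrite author's own statement) =====
-- stated objective: alternative
-- what changed: B never represents the candidates: it scans the block lengths once and then computes the selected index arithmetically as the sum of the lower-half sizes skipped at the B/R steps, instead of materialising list(range(total_len)) and slicing it per character (intended as faster; measured only ~1.49x at the largest size).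
import Mathlib
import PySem

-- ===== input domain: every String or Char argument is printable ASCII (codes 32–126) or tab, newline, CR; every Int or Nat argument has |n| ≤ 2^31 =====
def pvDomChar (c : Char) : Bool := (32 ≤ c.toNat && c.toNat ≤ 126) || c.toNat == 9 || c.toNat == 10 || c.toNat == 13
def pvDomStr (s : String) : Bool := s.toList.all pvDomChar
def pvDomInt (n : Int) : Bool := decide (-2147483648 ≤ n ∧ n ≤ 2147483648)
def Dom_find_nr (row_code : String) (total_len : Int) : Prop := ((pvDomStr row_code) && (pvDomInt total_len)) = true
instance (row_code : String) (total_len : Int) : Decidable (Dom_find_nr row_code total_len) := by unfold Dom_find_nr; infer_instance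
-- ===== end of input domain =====

-- B computes the selected index as the sum of the lower-half sizes at the B/R steps (after one
-- scan of the block lengths) instead of slicing a materialised list(range(total_len)) per
-- character (objective: alternative).

-- ===== PORT A =====
-- int(len(candidates)/2): len(candidates) ≥ 0, so float truncation equals floor division by 2.
def find_nr (row_code : String) (total_len : Int) : Int :=
  let candidates := PySem.List.pyRange 0 total_len 1
  let final := row_code.toList.foldl (fun (candidates : List Int) code =>
    let split : Int := (candidates.length : Int) / 2
    if code = 'F' ∨ code = 'L' then PySem.List.slice candidates none (some split)
    else if code = 'B' ∨ code = 'R' then PySem.List.slice candidates (some split) none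
    else candidates) candidates
  (PySem.List.pyGet? final 0).getD 0   -- candidates[0]; none (IndexError) is excluded by Pre_

-- ===== PORT B =====
def find_nr_alt (row_code : String) (total_len : Int) : Int :=
  -- stage 1: block length in effect before each character's step
  let st := row_code.toList.foldl (fun (st : List Int × Int) c =>
      (st.1 ++ [st.2],
       if c = 'F' ∨ c = 'L' then PySem.Int.floordiv st.2 2
       else if c = 'B' ∨ c = 'R' then st.2 - PySem.Int.floordiv st.2 2
       else st.2)) ([], total_len)
  -- stage 2: sum of the lower-half sizes skipped at the B/R steps
  (row_code.toList.zip st.1).foldl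
    (fun total p => if p.1 = 'B' ∨ p.1 = 'R' then total + PySem.Int.floordiv p.2 2 else total) 0

-- ===== PRECONDITION & SPEC =====
-- pvNeed row_code is the minimal total_len whose candidate list survives all the halvings
-- with at least one element (backward recursion: keeping the first half of a block of
-- length l needs l ≥ 2m, keeping the second half needs l ≥ 2m-1).
def pvNeed (cs : List Char) : Int :=
  cs.foldr (fun c m =>
    if c = 'F' ∨ c = 'L' then 2 * m
    else if c = 'B' ∨ c = 'R' then 2 * m - 1
    else m) 1

-- Pre_ excludes exactly the inputs on which A raises (candidates is empty at the end and
-- candidates[0] raises IndexError): those with total_len < pvNeed row_code.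
def Pre_find_nr (row_code : String) (total_len : Int) : Prop :=
  pvNeed row_code.toList ≤ total_len
instance (row_code : String) (total_len : Int) : Decidable (Pre_find_nr row_code total_len) := by
  unfold Pre_find_nr; infer_instance

def pvWitness_find_nr : String × Int := ("BFBBBFF", 128)

def Spec_find_nr (row_code : String) (total_len : Int) (out : Int) : Prop := out = find_nr_alt row_code total_len
instance (row_code : String) (total_len : Int) (out : Int) : Decidable (Spec_find_nr row_code total_len out) := by unfold Spec_find_nr; infer_instance

-- ===== CLAIM (what is proved, stated in full; the proofs are below) =====
def Claim_equal_find_nr : Prop := ∀ (row_code : String) (total_len : Int), Dom_find_nr row_code total_len → Pre_find_nr row_code total_len → Spec_find_nr row_code total_len (find_nr row_code total_len)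

-- ===== LEMMAS AND PROOFS =====

-- Named copies of the loop bodies.
def pvStepA (candidates : List Int) (code : Char) : List Int :=
  if code = 'F' ∨ code = 'L' then PySem.List.slice candidates none (some ((candidates.length : Int) / 2))
  else if code = 'B' ∨ code = 'R' then PySem.List.slice candidates (some ((candidates.length : Int) / 2)) none
  else candidates

-- the length update of B's stage 1
def pvStepL (l : Int) (c : Char) : Int :=
  if c = 'F' ∨ c = 'L' then PySem.Int.floordiv l 2
  else if c = 'B' ∨ c = 'R' then l - PySem.Int.floordiv l 2
  else l

def pvStep1 (st : List Int × Int) (c : Char) : List Int × Int := (st.1 ++ [st.2], pvStepL st.2 c)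

def pvStep2 (total : Int) (p : Char × Int) : Int :=
  if p.1 = 'B' ∨ p.1 = 'R' then total + PySem.Int.floordiv p.2 2 else total

-- the list of block lengths produced by stage 1
def pvScan : List Char → Int → List Int
  | [], _ => []
  | c :: cs, l => l :: pvScan cs (pvStepL l c)

-- the sum computed by stage 2, and the final block length
def pvSum (cs : List Char) (l : Int) : Int := ((cs.zip (pvScan cs l)).foldl pvStep2 0)
def pvFlen : List Char → Int → Int
  | [], l => l
  | c :: cs, l => pvFlen cs (pvStepL l c)

theorem find_nr_eq (row_code : String) (total_len : Int) :
    find_nr row_code total_len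
      = (PySem.List.pyGet? (row_code.toList.foldl pvStepA (PySem.List.pyRange 0 total_len 1)) 0).getD 0 := rfl

theorem pvScan_spec (cs : List Char) (acc : List Int) (l : Int) :
    (cs.foldl pvStep1 (acc, l)).1 = acc ++ pvScan cs l := by
  induction cs generalizing acc l with
  | nil => simp [pvScan]
  | cons c cs ih => simp [pvStep1, pvScan, ih, List.append_assoc]

theorem find_nr_alt_eq (row_code : String) (total_len : Int) :
    find_nr_alt row_code total_len = pvSum row_code.toList total_len := by
  show (row_code.toList.zip (row_code.toList.foldl pvStep1 ([], total_len)).1).foldl pvStep2 0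
      = pvSum row_code.toList total_len
  rw [pvScan_spec, List.nil_append, pvSum]

theorem pvStep2_shift (xs : List (Char × Int)) (s : Int) :
    xs.foldl pvStep2 s = s + xs.foldl pvStep2 0 := by
  induction xs generalizing s with
  | nil => simp
  | cons x xs ih =>
    simp only [List.foldl_cons]
    rw [ih (pvStep2 s x), ih (pvStep2 0 x)]
    unfold pvStep2
    split_ifs <;> ring

theorem pvSum_cons (c : Char) (cs : List Char) (l : Int) :
    pvSum (c :: cs) l
      = (if c = 'B' ∨ c = 'R' then PySem.Int.floordiv l 2 else 0) + pvSum cs (pvStepL l c) := by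
  unfold pvSum
  simp only [pvScan, List.zip_cons_cons, List.foldl_cons]
  rw [pvStep2_shift]
  unfold pvStep2
  split_ifs <;> simp

theorem pvNeed_pos (cs : List Char) : 1 ≤ pvNeed cs := by
  induction cs with
  | nil => simp [pvNeed]
  | cons c cs ih =>
    simp only [pvNeed, List.foldr_cons] at *
    split_ifs <;> omega

-- Main invariant: starting from any interval [lo, hi) with 0 ≤ lo and room pvNeed cs,
-- A's list fold stays the contiguous block that starts pvSum cs (hi-lo) above lo and has
-- pvFlen cs (hi-lo) ≥ 1 elements.
theorem pv_run (cs : List Char) (lo hi : Int) (h0 : 0 ≤ lo) (h : lo + pvNeed cs ≤ hi) :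
    cs.foldl pvStepA (PySem.List.pyRange lo hi 1)
      = PySem.List.pyRange (lo + pvSum cs (hi - lo))
          (lo + pvSum cs (hi - lo) + pvFlen cs (hi - lo)) 1
    ∧ 1 ≤ pvFlen cs (hi - lo) := by
  induction cs generalizing lo hi with
  | nil =>
    simp only [pvNeed, List.foldr_nil] at h
    have e0 : lo + pvSum [] (hi - lo) = lo := by simp [pvSum, pvScan]
    have e : lo + pvSum [] (hi - lo) + pvFlen [] (hi - lo) = hi := by
      simp [pvSum, pvScan, pvFlen]
    constructor
    · rw [List.foldl_nil, e, e0]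
    · simp only [pvFlen]; omega
  | cons c cs ih =>
    have hneed : 1 ≤ pvNeed cs := pvNeed_pos cs
    have hm : pvNeed (c :: cs)
        = (if c = 'F' ∨ c = 'L' then 2 * pvNeed cs
           else if c = 'B' ∨ c = 'R' then 2 * pvNeed cs - 1 else pvNeed cs) := rfl
    have hlohi : lo ≤ hi := by rw [hm] at h; split_ifs at h <;> omega
    have hlen : ((PySem.List.pyRange lo hi 1).length : Int) = hi - lo := by
      rw [PySem.List.length_pyRange_one]; omega
    have hhalf : PySem.Int.floordiv (hi - lo) 2 = (hi - lo) / 2 :=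
      PySem.Int.floordiv_eq_ediv_of_pos (by omega)
    have hhb : 0 ≤ (hi - lo) / 2 ∧ (hi - lo) / 2 ≤ hi - lo := by omega
    have hsplitrange :
        PySem.List.pyRange lo hi 1
          = PySem.List.pyRange lo (lo + (hi - lo) / 2) 1
            ++ PySem.List.pyRange (lo + (hi - lo) / 2) hi 1 :=
      PySem.List.pyRange_one_append lo (lo + (hi - lo) / 2) hi (by omega) (by omega)
    have hfirstlen : (PySem.List.pyRange lo (lo + (hi - lo) / 2) 1).length = ((hi - lo) / 2).toNat := by
      rw [PySem.List.length_pyRange_one]; congr 1; omega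
    have hstepA : pvStepA (PySem.List.pyRange lo hi 1) c
        = if c = 'F' ∨ c = 'L' then PySem.List.pyRange lo (lo + (hi - lo) / 2) 1
          else if c = 'B' ∨ c = 'R' then PySem.List.pyRange (lo + (hi - lo) / 2) hi 1
          else PySem.List.pyRange lo hi 1 := by
      unfold pvStepA
      rw [hlen]
      split_ifs with h1 h2
      · rw [PySem.List.slice_to _ (by omega), hsplitrange, ← hfirstlen, List.take_left]
      · rw [PySem.List.slice_from _ (by omega), hsplitrange, ← hfirstlen, List.drop_left]
      · rfl
    have hstepL : pvStepL (hi - lo) c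
        = if c = 'F' ∨ c = 'L' then (hi - lo) / 2
          else if c = 'B' ∨ c = 'R' then (hi - lo) - (hi - lo) / 2
          else hi - lo := by
      unfold pvStepL
      simp only [hhalf]
    rw [List.foldl_cons, hstepA, pvSum_cons, hhalf, hstepL]
    simp only [pvFlen, hstepL]
    rw [hm] at h
    rcases em (c = 'F' ∨ c = 'L') with h1 | h1
    · -- keep the first half: interval [lo, lo + (hi-lo)/2)
      have h2 : ¬ (c = 'B' ∨ c = 'R') := by rcases h1 with rfl | rfl <;> simp
      simp only [if_pos h1, if_neg h2, zero_add] at h ⊢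
      have := ih lo (lo + (hi - lo) / 2) h0 (by omega)
      simp only [add_sub_cancel_left] at this
      exact this
    · rcases em (c = 'B' ∨ c = 'R') with h2 | h2
      · -- keep the second half: interval [lo + (hi-lo)/2, hi)
        simp only [if_neg h1, if_pos h2] at h ⊢
        have := ih (lo + (hi - lo) / 2) hi (by omega) (by omega)
        have hsub : hi - (lo + (hi - lo) / 2) = (hi - lo) - (hi - lo) / 2 := by omega
        rw [hsub] at this
        have e : lo + (hi - lo) / 2 + pvSum cs ((hi - lo) - (hi - lo) / 2)
            = lo + ((hi - lo) / 2 + pvSum cs ((hi - lo) - (hi - lo) / 2)) := by ring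
        rw [e] at this
        exact this
      · -- irrelevant character: nothing changes
        simp only [if_neg h1, if_neg h2, zero_add] at h ⊢
        exact ih lo hi h0 (by omega)

-- ===== VERDICT (by name: the statement is the Claim_ definition above) =====
theorem find_nr_spec : Claim_equal_find_nr := by
  intro row_code total_len _hdom hpre
  unfold Pre_find_nr at hpre
  have hneed := pvNeed_pos row_code.toList
  have h := pv_run row_code.toList 0 total_len le_rfl (by omega)
  unfold Spec_find_nr
  rw [find_nr_eq, find_nr_alt_eq]
  simp only [sub_zero] at h
  rw [h.1, PySem.List.pyRange_one_cons (by have := h.2; omega)]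
  rw [PySem.List.pyGet?_zero_cons, Option.getD_some, zero_add]
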